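-- pv_equiv track=rewrite | github.com/divyanshukr2401/PrithviNET_CPCB | backend/app/services/gamification/eco_points.py | compute_level
-- ===== SOURCE A (Python) =====
-- LEVELS = [
--     (0, "Seedling"),
--     (100, "Sprout"),
--     (300, "Sapling"),
--     (600, "Tree"),
--     (1000, "Grove"),
--     (2000, "Forest"),
--     (4000, "Ecosystem"),
--     (8000, "Biosphere Guardian"),
-- ]
--
-- def compute_level(points: int) -> tuple[int, str]:
--     """Return (level_number, level_name) for a given point total."""
--     level_num = 1
--     level_name = "Seedling"
--     for i, (threshold, name) in enumerate(LEVELS):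
--         if points >= threshold:
--             level_num = i + 1
--             level_name = name
--     return level_num, level_name
-- ===== SOURCE B (Python) =====
-- from bisect import bisect_right
--
-- LEVELS = [
--     (0, "Seedling"),
--     (100, "Sprout"),
--     (300, "Sapling"),
--     (600, "Tree"),
--     (1000, "Grove"),
--     (2000, "Forest"),
--     (4000, "Ecosystem"),
--     (8000, "Biosphere Guardian"),
-- ]
--
-- _THRESHOLDS = [t for t, _ in LEVELS]
--
-- def compute_level(points: int) -> tuple[int, str]:
--     """Return (level_number, level_name) for a given point total."""
--     level_num = max(1, bisect_right(_THRESHOLDS, points))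
--     return level_num, LEVELS[level_num - 1][1]
-- ===== Notes on version B (the rewrite author's own statement) =====
-- stated objective: idiomatic
-- what changed: Replaced the linear scan over all LEVELS (tracking the last matching tier) with a bisect_right binary search over a precomputed threshold list, clamped so sub-threshold totals still map to the lowest level.
import Mathlib
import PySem

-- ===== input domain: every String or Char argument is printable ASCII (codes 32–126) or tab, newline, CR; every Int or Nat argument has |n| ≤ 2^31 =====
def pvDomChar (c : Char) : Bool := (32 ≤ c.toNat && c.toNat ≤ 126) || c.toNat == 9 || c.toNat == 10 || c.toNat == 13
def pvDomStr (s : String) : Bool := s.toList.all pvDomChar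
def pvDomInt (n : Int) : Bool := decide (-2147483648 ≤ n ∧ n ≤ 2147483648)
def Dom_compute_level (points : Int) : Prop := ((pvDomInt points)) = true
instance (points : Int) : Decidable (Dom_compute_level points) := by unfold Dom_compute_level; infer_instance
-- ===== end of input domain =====

-- B replaces A's linear scan over LEVELS with a bisect_right binary search on the
-- precomputed threshold list (clamped to 1); same return value, more idiomatic.

def LEVELS : List (Int × String) :=
  [(0, "Seedling"), (100, "Sprout"), (300, "Sapling"), (600, "Tree"),
   (1000, "Grove"), (2000, "Forest"), (4000, "Ecosystem"), (8000, "Biosphere Guardian")]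

-- ===== PORT A =====
def compute_level (points : Int) : Int × String :=
  let init : Int × String := (1, "Seedling")
  (PySem.List.enumerate LEVELS).foldl
    (fun acc p =>
      let i := p.1; let threshold := p.2.1; let name := p.2.2
      if points ≥ threshold then (i + 1, name) else acc)
    init

-- ===== PORT B =====
def THRESHOLDS : List Int := LEVELS.map Prod.fst

def compute_level_alt (points : Int) : Int × String :=
  let level_num : Int := max 1 (PySem.List.bisectRight THRESHOLDS points)
  -- LEVELS[level_num - 1][1]: index is always in range (1 ≤ level_num ≤ 8), getD is a total wrapper
  (level_num, ((PySem.List.pyGet? LEVELS (level_num - 1)).getD (0, "")).2)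

-- ===== PRECONDITION & SPEC =====
def Spec_compute_level (points : Int) (out : Int × String) : Prop := out = compute_level_alt points
instance (points : Int) (out : Int × String) : Decidable (Spec_compute_level points out) := by unfold Spec_compute_level; infer_instance

-- ===== CLAIM (what is proved, stated in full; the proofs are below) =====
def Claim_equal_compute_level : Prop := ∀ (points : Int), Dom_compute_level points → Spec_compute_level points (compute_level points)

-- ===== LEMMAS AND PROOFS =====

-- ===== VERDICT (by name: the statement is the Claim_ definition above) =====
set_option maxHeartbeats 2000000 in
theorem compute_level_spec : Claim_equal_compute_level := by
  intro p _
  obtain ⟨hle, hlt, hge⟩ :=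
    PySem.List.bisectRight_spec [0, 100, 300, 600, 1000, 2000, 4000, 8000] p (by decide)
  unfold Spec_compute_level compute_level compute_level_alt THRESHOLDS LEVELS
  simp only [PySem.List.enumerate, List.foldl, List.map]
  set b := PySem.List.bisectRight [0, 100, 300, 600, 1000, 2000, 4000, 8000] p with hb
  have a0 := hlt 0 (by norm_num); have a1 := hlt 1 (by norm_num)
  have a2 := hlt 2 (by norm_num); have a3 := hlt 3 (by norm_num)
  have a4 := hlt 4 (by norm_num); have a5 := hlt 5 (by norm_num)
  have a6 := hlt 6 (by norm_num); have a7 := hlt 7 (by norm_num)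
  have c0 := hge 0 (by norm_num); have c1 := hge 1 (by norm_num)
  have c2 := hge 2 (by norm_num); have c3 := hge 3 (by norm_num)
  have c4 := hge 4 (by norm_num); have c5 := hge 5 (by norm_num)
  have c6 := hge 6 (by norm_num); have c7 := hge 7 (by norm_num)
  simp only [List.getElem_cons_zero, List.getElem_cons_succ]
    at a0 a1 a2 a3 a4 a5 a6 a7 c0 c1 c2 c3 c4 c5 c6 c7
  clear hlt hge hb
  simp only [List.length_cons, List.length_nil] at hle
  interval_cases b <;>
    simp_all [PySem.List.pyGet?, PySem.List.pyIdx?] <;>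
    split_ifs <;> simp_all <;> omega
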